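-- pv_equiv track=rewrite | github.com/1-ManArmy/organic-invention | agents/seraphina/memory/emotional_memory.py | _analyze_emotional_trajectory
-- ===== SOURCE A (Python) =====
-- def _analyze_emotional_trajectory(interactions):
--     """Analyze emotional progression in conversation"""
--
--     emotions = [i.get('user_emotion', 'neutral') for i in interactions]
--
--     if not emotions:
--         return 'stable'
--
--     # Simple trajectory analysis
--     positive_emotions = ['happy', 'romantic', 'excited', 'playful']
--     negative_emotions = ['sad', 'angry', 'frustrated']
--
--     recent_positive = sum(1 for e in emotions[-5:] if e in positive_emotions)
--     recent_negative = sum(1 for e in emotions[-5:] if e in negative_emotions)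
--
--     if recent_positive > recent_negative:
--         return 'improving'
--     elif recent_negative > recent_positive:
--         return 'declining'
--     else:
--         return 'stable'
-- ===== SOURCE B (Python) =====
-- def _analyze_emotional_trajectory(interactions):
--     """Analyze emotional progression in conversation"""
--     # Boyer-Moore-style cancellation: keep a leading verdict and a count;
--     # an opposite-signed emotion cancels one unit of the leader's support.
--     lead, count = 'stable', 0
--     for i in interactions[-5:]:
--         e = i.get('user_emotion', 'neutral')
--         if e in ('happy', 'romantic', 'excited', 'playful'):
--             d = 'improving'
--         elif e in ('sad', 'angry', 'frustrated'):
--             d = 'declining'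
--         else:
--             continue
--         if count == 0:
--             lead, count = d, 1
--         elif lead == d:
--             count += 1
--         else:
--             count -= 1
--     return lead if count > 0 else 'stable'
-- ===== Notes on version B (the rewrite author's own statement) =====
-- stated objective: alternative
-- what changed: Replaces A's full emotion extraction plus two separate counting passes and a count comparison with a single Boyer-Moore-style streaming pass over the last-5 slice that maintains a leading verdict and a cancellation counter (opposite emotions cancel one unit of the leader's support), returning the leader if its count survives.
import Mathlib
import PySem

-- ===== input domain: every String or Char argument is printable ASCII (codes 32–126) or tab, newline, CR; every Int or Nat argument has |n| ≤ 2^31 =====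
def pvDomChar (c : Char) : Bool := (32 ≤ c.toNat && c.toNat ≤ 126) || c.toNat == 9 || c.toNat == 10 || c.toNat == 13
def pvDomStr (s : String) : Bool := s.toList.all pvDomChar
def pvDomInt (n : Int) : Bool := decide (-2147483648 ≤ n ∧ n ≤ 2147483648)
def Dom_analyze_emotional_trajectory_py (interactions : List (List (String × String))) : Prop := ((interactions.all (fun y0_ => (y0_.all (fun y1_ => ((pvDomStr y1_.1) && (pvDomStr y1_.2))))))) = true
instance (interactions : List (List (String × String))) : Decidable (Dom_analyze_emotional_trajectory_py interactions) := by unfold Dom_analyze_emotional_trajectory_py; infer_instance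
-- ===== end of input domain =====

-- B replaces A's emotion extraction plus two counting passes and their comparison by a single
-- Boyer-Moore-style streaming pass over interactions[-5:] maintaining a leading verdict and a
-- cancellation counter (objective: alternative).

-- ===== PORT A =====
def pvPositive : List String := ["happy", "romantic", "excited", "playful"]
def pvNegative : List String := ["sad", "angry", "frustrated"]

def analyze_emotional_trajectory_py (interactions : List (List (String × String))) : String :=
  let emotions := interactions.map (fun i => (PySem.Dict.mk i).getD "user_emotion" "neutral")
  if emotions = [] then "stable"
  else
    let recent := PySem.List.slice emotions (some (-5)) none
    let recent_positive := recent.countP (fun e => pvPositive.contains e)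
    let recent_negative := recent.countP (fun e => pvNegative.contains e)
    if recent_positive > recent_negative then "improving"
    else if recent_negative > recent_positive then "declining"
    else "stable"

-- ===== PORT B =====
def pvPosB : List String := ["happy", "romantic", "excited", "playful"]
def pvNegB : List String := ["sad", "angry", "frustrated"]

-- one vote for verdict d: start a new leader, reinforce the leader, or cancel one unit
def pvVote (s : String × Int) (d : String) : String × Int :=
  if s.2 = 0 then (d, 1)
  else if s.1 = d then (s.1, s.2 + 1)
  else (s.1, s.2 - 1)

def pvStepB (s : String × Int) (i : List (String × String)) : String × Int :=
  let e := (PySem.Dict.mk i).getD "user_emotion" "neutral"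
  if pvPosB.contains e then pvVote s "improving"
  else if pvNegB.contains e then pvVote s "declining"
  else s

def analyze_emotional_trajectory_py_alt (interactions : List (List (String × String))) : String :=
  let st := (PySem.List.slice interactions (some (-5)) none).foldl pvStepB ("stable", 0)
  if st.2 > 0 then st.1 else "stable"

-- ===== PRECONDITION & SPEC =====
def Spec_analyze_emotional_trajectory_py (interactions : List (List (String × String))) (out : String) : Prop := out = analyze_emotional_trajectory_py_alt interactions
instance (interactions : List (List (String × String))) (out : String) : Decidable (Spec_analyze_emotional_trajectory_py interactions out) := by unfold Spec_analyze_emotional_trajectory_py; infer_instance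

-- ===== CLAIM (what is proved, stated in full; the proofs are below) =====
def Claim_equal_analyze_emotional_trajectory_py : Prop := ∀ (interactions : List (List (String × String))), Dom_analyze_emotional_trajectory_py interactions → Spec_analyze_emotional_trajectory_py interactions (analyze_emotional_trajectory_py interactions)

-- ===== LEMMAS AND PROOFS =====

-- numeric reading of a leader/count state: +count, -count or 0 by the leader's verdict
def pvEnc (s : String × Int) : Int :=
  if s.1 = "improving" then s.2 else if s.1 = "declining" then -s.2 else 0

-- reachable states: nonnegative count, and a leader only of the two verdicts unless count is 0
def pvInv (s : String × Int) : Prop :=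
  0 ≤ s.2 ∧ (s.1 = "improving" ∨ s.1 = "declining" ∨ s.2 = 0)

lemma pv_vote_pos (s : String × Int) (h : pvInv s) :
    pvInv (pvVote s "improving") ∧ pvEnc (pvVote s "improving") = pvEnc s + 1 := by
  obtain ⟨h0, h1⟩ := h
  unfold pvVote pvEnc pvInv
  split_ifs <;> simp_all <;> omega

lemma pv_vote_neg (s : String × Int) (h : pvInv s) :
    pvInv (pvVote s "declining") ∧ pvEnc (pvVote s "declining") = pvEnc s - 1 := by
  obtain ⟨h0, h1⟩ := h
  unfold pvVote pvEnc pvInv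
  split_ifs <;> simp_all <;> omega

lemma pv_disjoint (e : String) (h : e ∈ pvPosB) : e ∉ pvNegB := by
  simp only [pvPosB, List.mem_cons, List.not_mem_nil, or_false] at h
  rcases h with h | h | h | h <;> subst h <;> decide

lemma pv_step (s : String × Int) (i : List (String × String)) (h : pvInv s) :
    pvInv (pvStepB s i) ∧
    pvEnc (pvStepB s i) = pvEnc s +
      ((if pvPosB.contains ((PySem.Dict.mk i).getD "user_emotion" "neutral") then (1 : Int) else 0) -
       (if pvNegB.contains ((PySem.Dict.mk i).getD "user_emotion" "neutral") then (1 : Int) else 0)) := by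
  simp only [pvStepB, List.contains_eq_mem, decide_eq_true_eq]
  set e := (PySem.Dict.mk i).getD "user_emotion" "neutral" with he
  by_cases hp : e ∈ pvPosB
  · have hn := pv_disjoint e hp
    have hv := pv_vote_pos s h
    simp [hp, hn, hv.1, hv.2]
  · by_cases hn : e ∈ pvNegB
    · have hv := pv_vote_neg s h
      simp [hp, hn, hv.1, hv.2]
      omega
    · simp [hp, hn, h]

lemma pv_fold (l : List (List (String × String))) (s : String × Int) (h : pvInv s) :
    pvInv (l.foldl pvStepB s) ∧
    pvEnc (l.foldl pvStepB s) = pvEnc s +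
      ((l.countP (fun i => pvPosB.contains ((PySem.Dict.mk i).getD "user_emotion" "neutral")) : Int) -
       (l.countP (fun i => pvNegB.contains ((PySem.Dict.mk i).getD "user_emotion" "neutral")) : Int)) := by
  induction l generalizing s with
  | nil => simpa using h
  | cons x xs ih =>
    obtain ⟨hstep, henc⟩ := pv_step s x h
    obtain ⟨hinv, hsum⟩ := ih (pvStepB s x) hstep
    refine ⟨hinv, ?_⟩
    rw [List.foldl_cons] at *
    rw [hsum, henc, List.countP_cons, List.countP_cons]
    split_ifs <;> push_cast <;> ring

-- ===== VERDICT (by name: the statement is the Claim_ definition above) =====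
theorem analyze_emotional_trajectory_py_spec : Claim_equal_analyze_emotional_trajectory_py := by
  intro xs _
  show analyze_emotional_trajectory_py xs = analyze_emotional_trajectory_py_alt xs
  cases xs with
  | nil => decide
  | cons y ys =>
    simp only [analyze_emotional_trajectory_py, analyze_emotional_trajectory_py_alt]
    rw [if_neg (by simp), PySem.List.slice_from_neg_ofNat _ 5 (by omega),
        PySem.List.slice_from_neg_ofNat _ 5 (by omega),
        List.length_map, ← List.map_drop, List.countP_map, List.countP_map]
    set l := (y :: ys).drop ((y :: ys).length - 5) with hl
    obtain ⟨⟨hc0, hlead⟩, henc⟩ := pv_fold l ("stable", 0) (by constructor <;> simp)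
    set st := l.foldl pvStepB ("stable", 0) with hst
    have hp : (fun i => pvPositive.contains ((PySem.Dict.mk i).getD "user_emotion" "neutral")) =
        (fun i => pvPosB.contains ((PySem.Dict.mk i).getD "user_emotion" "neutral")) := rfl
    have hn : (fun i => pvNegative.contains ((PySem.Dict.mk i).getD "user_emotion" "neutral")) =
        (fun i => pvNegB.contains ((PySem.Dict.mk i).getD "user_emotion" "neutral")) := rfl
    simp only [Function.comp_def, hp, hn]
    set P := l.countP (fun i => pvPosB.contains ((PySem.Dict.mk i).getD "user_emotion" "neutral")) with hPdef
    set N := l.countP (fun i => pvNegB.contains ((PySem.Dict.mk i).getD "user_emotion" "neutral")) with hNdef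
    rcases hlead with h | h | h
    · simp [pvEnc, h] at henc
      rw [h]
      split_ifs <;> first | rfl | (exfalso; omega)
    · simp [pvEnc, h] at henc
      rw [h]
      split_ifs <;> first | rfl | (exfalso; omega)
    · simp [pvEnc, h] at henc
      split_ifs <;> first | rfl | (exfalso; omega)
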